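-- pv_equiv track=rewrite | github.com/pratham-0204/Shuttle_Management_System | Blueprints/getShuttles.py | checkAvailability
-- ===== SOURCE A (Python) =====
-- def checkAvailability(prefixlist, from_stop, to_stop, capacity, sequencelist):
--     if from_stop not in sequencelist or to_stop not in sequencelist:
--         return -1
--
--     sum = 0
--     templist = []
--
--     for i in prefixlist:
--         sum += i
--         templist.append(sum)
--
--     maxx = 0
--     for i in range(sequencelist.index(from_stop), sequencelist.index(to_stop) ):
--         if templist[i] >= capacity:
--             return -1
--         maxx = max(maxx, templist[i])
--
--     return maxx # Return the maximum number of seats occupied in the shuttle between `from_stop` and `to_stop`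
-- ===== SOURCE B (Python) =====
-- def checkAvailability(prefixlist, from_stop, to_stop, capacity, sequencelist):
--     if from_stop not in sequencelist or to_stop not in sequencelist:
--         return -1
--     lo = sequencelist.index(from_stop)
--     hi = sequencelist.index(to_stop)
--     running = 0
--     maxx = 0
--     for i, v in enumerate(prefixlist):
--         if i >= hi:
--             break
--         running += v
--         if i >= lo:
--             if running >= capacity:
--                 return -1
--             if running > maxx:
--                 maxx = running
--     return maxx
-- ===== Notes on version B (the rewrite author's own statement) =====
-- stated objective: simpler
-- what changed: Single pass with a running cumulative sum (break at index(to_stop)) instead of first materialising the whole prefix-sum list and then re-indexing it over range(index(from_stop), index(to_stop)).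
import Mathlib
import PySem

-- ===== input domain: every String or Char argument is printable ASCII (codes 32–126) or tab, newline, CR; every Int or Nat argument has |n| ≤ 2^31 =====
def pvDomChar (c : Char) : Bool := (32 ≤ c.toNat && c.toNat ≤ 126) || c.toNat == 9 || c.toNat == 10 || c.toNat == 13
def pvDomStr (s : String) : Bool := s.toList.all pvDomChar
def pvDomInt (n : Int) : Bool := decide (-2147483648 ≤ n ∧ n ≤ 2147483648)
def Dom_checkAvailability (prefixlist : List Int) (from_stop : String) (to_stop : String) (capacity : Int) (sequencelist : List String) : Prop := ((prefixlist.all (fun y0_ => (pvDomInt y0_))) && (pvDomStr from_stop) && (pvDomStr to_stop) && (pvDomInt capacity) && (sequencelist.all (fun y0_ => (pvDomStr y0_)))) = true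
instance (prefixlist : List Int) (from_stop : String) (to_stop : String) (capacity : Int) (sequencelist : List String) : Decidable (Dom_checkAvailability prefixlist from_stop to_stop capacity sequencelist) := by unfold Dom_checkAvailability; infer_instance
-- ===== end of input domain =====

-- B replaces A's materialised prefix-sum list + range re-indexing by a single pass with a
-- running cumulative sum that stops at index(to_stop): simpler, no temporary list.
-- Pre_ excludes exactly the inputs where A raises IndexError (to_stop's index past prefixlist);
-- on those excluded inputs B returns a value (the capacity-checked maximum over existing prefixes).


-- ===== PORT A =====
-- second loop of A: for i in range(lo, hi): if templist[i] >= capacity: return -1; maxx = max(maxx, templist[i])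
-- (templist[i] ported via pyGet?; .getD 0 only fills the IndexError case, which Pre_ excludes)
def pvALoop (templist : List Int) (capacity : Int) : List Int → Int → Int
  | [], maxx => maxx
  | i :: rest, maxx =>
    let t := (PySem.List.pyGet? templist i).getD 0
    if t ≥ capacity then -1 else pvALoop templist capacity rest (max maxx t)

def checkAvailability (prefixlist : List Int) (from_stop : String) (to_stop : String) (capacity : Int) (sequencelist : List String) : Int :=
  if from_stop ∉ sequencelist ∨ to_stop ∉ sequencelist then -1
  else
    -- first loop: sum += i; templist.append(sum)
    let st := prefixlist.foldl (fun (st : Int × List Int) i => (st.1 + i, st.2 ++ [st.1 + i])) (0, [])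
    let templist := st.2
    let lo : Int := ((PySem.List.index? sequencelist from_stop).getD 0 : Nat)
    let hi : Int := ((PySem.List.index? sequencelist to_stop).getD 0 : Nat)
    pvALoop templist capacity (PySem.List.pyRange lo hi 1) 0

-- ===== PORT B =====
-- single pass: for i, v in enumerate(prefixlist): break at hi; fold running sum into maxx from lo on
def pvBLoop (lo hi capacity : Int) : List Int → Int → Int → Int → Int
  | [], _, _, maxx => maxx
  | v :: rest, i, running, maxx =>
    if i ≥ hi then maxx
    else
      let r := running + v
      if i ≥ lo then
        if r ≥ capacity then -1
        else pvBLoop lo hi capacity rest (i + 1) r (if r > maxx then r else maxx)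
      else pvBLoop lo hi capacity rest (i + 1) r maxx

def checkAvailability_alt (prefixlist : List Int) (from_stop : String) (to_stop : String) (capacity : Int) (sequencelist : List String) : Int :=
  if from_stop ∉ sequencelist ∨ to_stop ∉ sequencelist then -1
  else
    let lo : Int := ((PySem.List.index? sequencelist from_stop).getD 0 : Nat)
    let hi : Int := ((PySem.List.index? sequencelist to_stop).getD 0 : Nat)
    pvBLoop lo hi capacity prefixlist 0 0 0

-- ===== PRECONDITION & SPEC =====
-- Pre_ excludes exactly the inputs where A raises IndexError: both stops present,
-- index(from_stop) < index(to_stop), and index(to_stop) > len(prefixlist).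
def Pre_checkAvailability (prefixlist : List Int) (from_stop : String) (to_stop : String) (capacity : Int) (sequencelist : List String) : Prop :=
  (from_stop ∈ sequencelist ∧ to_stop ∈ sequencelist) →
    ((PySem.List.index? sequencelist from_stop).getD 0 < (PySem.List.index? sequencelist to_stop).getD 0 →
      (PySem.List.index? sequencelist to_stop).getD 0 ≤ prefixlist.length)
instance (prefixlist : List Int) (from_stop : String) (to_stop : String) (capacity : Int) (sequencelist : List String) : Decidable (Pre_checkAvailability prefixlist from_stop to_stop capacity sequencelist) := by unfold Pre_checkAvailability; infer_instance

def pvWitness_checkAvailability : List Int × String × String × Int × List String := ([1, 2], "a", "b", 10, ["a", "b"])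

def Spec_checkAvailability (prefixlist : List Int) (from_stop : String) (to_stop : String) (capacity : Int) (sequencelist : List String) (out : Int) : Prop := out = checkAvailability_alt prefixlist from_stop to_stop capacity sequencelist
instance (prefixlist : List Int) (from_stop : String) (to_stop : String) (capacity : Int) (sequencelist : List String) (out : Int) : Decidable (Spec_checkAvailability prefixlist from_stop to_stop capacity sequencelist out) := by unfold Spec_checkAvailability; infer_instance

-- ===== CLAIM (what is proved, stated in full; the proofs are below) =====
def Claim_equal_checkAvailability : Prop := ∀ (prefixlist : List Int) (from_stop : String) (to_stop : String) (capacity : Int) (sequencelist : List String), Dom_checkAvailability prefixlist from_stop to_stop capacity sequencelist → Pre_checkAvailability prefixlist from_stop to_stop capacity sequencelist → Spec_checkAvailability prefixlist from_stop to_stop capacity sequencelist (checkAvailability prefixlist from_stop to_stop capacity sequencelist)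

-- ===== LEMMAS AND PROOFS =====

-- the prefix-sum list built by A's first fold, in recursive form
def pvPS (s : Int) : List Int → List Int
  | [] => []
  | x :: xs => (s + x) :: pvPS (s + x) xs

theorem pvFoldl_ps (xs : List Int) : ∀ (s : Int) (acc : List Int),
    (xs.foldl (fun (st : Int × List Int) i => (st.1 + i, st.2 ++ [st.1 + i])) (s, acc)).2 = acc ++ pvPS s xs := by
  induction xs with
  | nil => intro s acc; simp [pvPS]
  | cons x xs ih => intro s acc; simp [List.foldl, pvPS, ih, List.append_assoc]

theorem pvPS_length (xs : List Int) : ∀ s, (pvPS s xs).length = xs.length := by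
  induction xs with
  | nil => intro s; rfl
  | cons x xs ih => intro s; simp [pvPS, ih]

theorem pvPS_getElem (xs : List Int) : ∀ (s : Int) (k : Nat) (hk : k < xs.length),
    (pvPS s xs)[k]'(by rw [pvPS_length]; exact hk) = s + (xs.take (k + 1)).sum := by
  induction xs with
  | nil => intro s k hk; simp at hk
  | cons x xs ih =>
    intro s k hk
    cases k with
    | zero => simp [pvPS]
    | succ k =>
      simp only [pvPS, List.getElem_cons_succ, List.take_succ_cons, List.sum_cons]
      rw [ih (s + x) k (by simpa using hk)]
      ring

-- the core correspondence between B's single pass and A's indexed loop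
theorem pvLoop_eq (prefixlist : List Int) (lo hi capacity : Int) (_hlo : 0 ≤ lo)
    (hhi : hi ≤ (prefixlist.length : Int) ∨ hi ≤ lo) :
    ∀ (xs : List Int) (i : Nat), xs = prefixlist.drop i →
      ∀ maxx,
        pvBLoop lo hi capacity xs (i : Int) ((prefixlist.take i).sum) maxx =
          pvALoop (pvPS 0 prefixlist) capacity (PySem.List.pyRange (max lo (i : Int)) hi 1) maxx := by
  intro xs
  induction xs with
  | nil =>
    intro i hdrop maxx
    have hlen : prefixlist.length ≤ i := by
      by_contra h
      have := List.drop_eq_nil_iff.mp hdrop.symm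
      omega
    rw [PySem.List.pyRange_one_eq_nil (by rcases hhi with h | h <;> omega : hi ≤ max lo (i : Int))]
    rfl
  | cons v rest ih =>
    intro i hdrop maxx
    have hi_lt : i < prefixlist.length := by
      by_contra h
      rw [List.drop_eq_nil_of_le (by omega)] at hdrop
      exact (List.cons_ne_nil v rest) hdrop
    have hv : prefixlist[i]'hi_lt = v := by
      have h := congrArg (fun t : List Int => t[0]?) hdrop
      simp only [List.getElem?_drop, Nat.add_zero] at h
      rw [List.getElem?_eq_getElem hi_lt] at h
      exact (Option.some.inj h).symm
    by_cases hih : (i : Int) ≥ hi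
    · rw [pvBLoop, if_pos hih, PySem.List.pyRange_one_eq_nil (by omega)]
      rfl
    · have hr : (prefixlist.take i).sum + v = (prefixlist.take (i + 1)).sum := by
        rw [List.take_add_one, List.getElem?_eq_getElem hi_lt]
        simp [hv]
      have hrest : rest = prefixlist.drop (i + 1) := by
        have := congrArg (List.drop 1) hdrop
        simpa [List.drop_drop] using this
      by_cases hil : (i : Int) ≥ lo
      · have hmax : max lo (i : Int) = (i : Int) := by omega
        have hrange : PySem.List.pyRange (max lo (i : Int)) hi 1 =
            (max lo (i : Int)) :: PySem.List.pyRange (max lo (i : Int) + 1) hi 1 :=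
          PySem.List.pyRange_one_cons (by omega)
        have htl : (PySem.List.pyGet? (pvPS 0 prefixlist) (i : Int)).getD 0 =
            (prefixlist.take (i + 1)).sum := by
          have hi' : i < (pvPS 0 prefixlist).length := by rw [pvPS_length]; exact hi_lt
          simp [PySem.List.pyGet?_natCast, List.getElem?_eq_getElem hi',
            pvPS_getElem prefixlist 0 i hi_lt]
        rw [pvBLoop, if_neg (by omega), if_pos hil, hrange, hmax, pvALoop]
        simp only [htl, hr]
        by_cases hcap : (prefixlist.take (i + 1)).sum ≥ capacity
        · rw [if_pos hcap, if_pos hcap]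
        · rw [if_neg hcap, if_neg hcap]
          have := ih (i + 1) (by simpa using hrest) (max maxx ((prefixlist.take (i + 1)).sum))
          push_cast at this ⊢
          rw [show (max lo ((i : Int) + 1)) = (i : Int) + 1 by omega] at this
          have hmm : max maxx ((prefixlist.take (i + 1)).sum) =
              (if (prefixlist.take (i + 1)).sum > maxx then (prefixlist.take (i + 1)).sum else maxx) := by
            rw [max_def]; split_ifs <;> omega
          rw [← hmm]
          exact this
      · have hmax : PySem.List.pyRange (max lo (i : Int)) hi 1 =
            PySem.List.pyRange (max lo ((i : Int) + 1)) hi 1 := by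
          by_cases h : hi ≤ lo
          · rw [PySem.List.pyRange_one_eq_nil (by omega), PySem.List.pyRange_one_eq_nil (by omega)]
          · congr 1; omega
        rw [pvBLoop, if_neg (by omega), if_neg hil, hmax]
        have := ih (i + 1) (by simpa using hrest) maxx
        push_cast at this ⊢
        rw [← this, hr]

-- ===== VERDICT (by name: the statement is the Claim_ definition above) =====
theorem checkAvailability_spec : Claim_equal_checkAvailability := by
  intro prefixlist from_stop to_stop capacity sequencelist _hdom hpre
  unfold Spec_checkAvailability checkAvailability checkAvailability_alt
  by_cases hmem : from_stop ∉ sequencelist ∨ to_stop ∉ sequencelist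
  · rw [if_pos hmem, if_pos hmem]
  · rw [if_neg hmem, if_neg hmem]
    push_neg at hmem
    have hpre' := hpre ⟨hmem.1, hmem.2⟩
    set loN : Nat := (PySem.List.index? sequencelist from_stop).getD 0 with hloN
    set hiN : Nat := (PySem.List.index? sequencelist to_stop).getD 0 with hhiN
    simp only [pvFoldl_ps, List.nil_append]
    have hhile : (hiN : Int) ≤ (prefixlist.length : Int) ∨ (hiN : Int) ≤ (loN : Int) := by
      by_cases h : loN < hiN
      · exact Or.inl (by exact_mod_cast hpre' h)
      · exact Or.inr (by omega)
    have := pvLoop_eq prefixlist (loN : Int) (hiN : Int) capacity (by positivity) hhile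
      prefixlist 0 (by simp) 0
    have h0 : max (loN : Int) ((0 : Nat) : Int) = (loN : Int) := by omega
    rw [h0] at this
    simpa using this.symm
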